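-- pv_equiv track=rewrite | github.com/huichen5796/2022-studienarbeit-hui-chen | lib/structur_analysis.py | vertical_melting
-- ===== SOURCE A (Python) =====
-- def vertical_melting(df_list):
--     row_list = []
--     number = len(df_list[0])
--     for i in range(number):
--         row_i = []
--         for row in df_list:
--             row_i.append(row[i])
--         row_list.append(row_i)
--     sch_row = []
--     for i in range(len(row_list)-1):
--         zwei_rows = [row_list[i][m]+row_list[i+1][m] for m in range(len(row_list[i]))]
--         result = all(['(empty_cell)' in cell for cell in zwei_rows[2:]])
--         if result == True:
--             if i-1 not in sch_row:
--                 sch_row.append(i)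
--     if len(sch_row) != 0:
--         for n in sch_row:
--             for spalt in df_list:
--                 spalt[n] = (spalt[n] + '_' + spalt[n+1]
--                             ).replace('_(empty_cell)', '').replace('(empty_cell)_', '').replace('-_', '-')
--         df_list_new = [None]*len(df_list)
--         for i in range(len(df_list_new)):
--             df_list_new[i] = [cell for ii, cell in enumerate(df_list[i]) if ii-1 not in sch_row]
--
--         return df_list_new
--     else:
--         return df_list
-- ===== SOURCE B (Python) =====
-- def _merge(s, t):
--     return (s + '_' + t).replace('_(empty_cell)', '').replace('(empty_cell)_', '').replace('-_', '-')
--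
--
-- def vertical_melting(df_list):
--     n_rows = len(df_list[0])
--     new_cols = [[] for _ in df_list]
--     i = 0
--     while i < n_rows:
--         if i + 1 < n_rows and all(
--                 '(empty_cell)' in col[i] + col[i + 1] for col in df_list[2:]):
--             for col, new in zip(df_list, new_cols):
--                 new.append(_merge(col[i], col[i + 1]))
--             i += 2
--         else:
--             for col, new in zip(df_list, new_cols):
--                 new.append(col[i])
--             i += 1
--     for col, new in zip(df_list, new_cols):
--         new.extend(col[n_rows:])
--     return new_cols
-- ===== Notes on version B (the rewrite author's own statement) =====
-- stated objective: simpler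
-- what changed: B replaces A's transpose pass, the sch_row merge-index list with its membership guard, the in-place column mutation and the rebuild filter by a single forward cursor over row indices that emits either a merged cell (advancing by 2) or the plain cell (advancing by 1) into fresh columns in one pass, passing any cells beyond the first column's length through unchanged.
import Mathlib
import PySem

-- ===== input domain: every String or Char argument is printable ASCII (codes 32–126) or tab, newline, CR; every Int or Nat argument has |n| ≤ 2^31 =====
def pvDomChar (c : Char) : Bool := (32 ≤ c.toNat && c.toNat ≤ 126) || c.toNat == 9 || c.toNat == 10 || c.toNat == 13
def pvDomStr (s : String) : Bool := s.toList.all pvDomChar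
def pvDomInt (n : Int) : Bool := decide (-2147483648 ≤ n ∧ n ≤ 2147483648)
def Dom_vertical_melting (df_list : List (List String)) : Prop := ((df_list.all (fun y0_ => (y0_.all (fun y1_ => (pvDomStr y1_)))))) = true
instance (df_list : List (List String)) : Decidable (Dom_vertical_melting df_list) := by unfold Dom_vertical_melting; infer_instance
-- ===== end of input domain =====

-- B replaces A's transpose + merge-row index list + in-place mutation + rebuild filter by a single
-- forward cursor over row indices that emits merged or plain cells column-wise in one pass (objective:
-- simpler; a timing run measured B faster by a constant factor). A mutates df_list in place when a
-- merge happens; the equivalence proved here is about the RETURN value only.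

-- ===== PORT A =====
def vertical_melting (df_list : List (List String)) : List (List String) :=
  -- number = len(df_list[0]); raises on empty df_list, excluded by Pre_ (port reads a default there)
  let number : Int := ((PySem.List.pyGetD df_list 0 []).length : Int)
  let row_list : List (List String) :=
    (PySem.List.pyRange 0 number 1).foldl (fun row_list i =>
      row_list ++ [df_list.foldl (fun row_i row => row_i ++ [PySem.List.pyGetD row i ""]) []]) []
  let sch_row : List Int :=
    (PySem.List.pyRange 0 ((row_list.length : Int) - 1) 1).foldl (fun sch_row i =>
      let zwei_rows : List String :=
        (PySem.List.pyRange 0 ((PySem.List.pyGetD row_list i []).length : Int) 1).map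
          (fun m => PySem.List.pyGetD (PySem.List.pyGetD row_list i []) m "" ++
                    PySem.List.pyGetD (PySem.List.pyGetD row_list (i + 1) []) m "")
      let result : Bool :=
        (PySem.List.slice zwei_rows (some 2) none).all
          (fun cell => PySem.Str.isIn "(empty_cell)" cell)
      if result = true then
        (if (i - 1) ∈ sch_row then sch_row else sch_row ++ [i])
      else sch_row) []
  if sch_row.length ≠ 0 then
    let df_list' : List (List String) :=
      sch_row.foldl (fun dfl n =>
        dfl.map (fun spalt =>
          PySem.List.pySetD spalt n
            (PySem.Str.replace (PySem.Str.replace (PySem.Str.replace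
              (PySem.List.pyGetD spalt n "" ++ "_" ++ PySem.List.pyGetD spalt (n + 1) "")
              "_(empty_cell)" "") "(empty_cell)_" "") "-_" "-"))) df_list
    (PySem.List.pyRange 0 ((df_list'.length : Int)) 1).map (fun i =>
      (PySem.List.enumerate (PySem.List.pyGetD df_list' i []) 0).foldl (fun acc p =>
        if (p.1 - 1) ∈ sch_row then acc else acc ++ [p.2]) [])
  else df_list

-- ===== PORT B =====
def vmMerge (s t : String) : String :=
  PySem.Str.replace (PySem.Str.replace (PySem.Str.replace (s ++ "_" ++ t)
    "_(empty_cell)" "") "(empty_cell)_" "") "-_" "-"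

def vmLoop (df_list : List (List String)) (n_rows : Nat) (i : Nat)
    (new_cols : List (List String)) : List (List String) :=
  if i < n_rows then
    if i + 1 < n_rows ∧
        ((df_list.drop 2).all (fun col =>
          PySem.Str.isIn "(empty_cell)" (col.getD i "" ++ col.getD (i + 1) ""))) = true then
      vmLoop df_list n_rows (i + 2)
        (List.zipWith (fun col nc => nc ++ [vmMerge (col.getD i "") (col.getD (i + 1) "")]) df_list new_cols)
    else
      vmLoop df_list n_rows (i + 1)
        (List.zipWith (fun col nc => nc ++ [col.getD i ""]) df_list new_cols)
  else new_cols
termination_by n_rows - i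

def vertical_melting_alt (df_list : List (List String)) : List (List String) :=
  List.zipWith (fun col nc => nc ++ PySem.List.slice col (some ((df_list.headD []).length : Int)) none)
    df_list (vmLoop df_list (df_list.headD []).length 0 (df_list.map (fun _ => [])))

-- ===== PRECONDITION & SPEC =====
-- Pre_ excludes exactly the inputs on which A raises IndexError: the empty list (df_list[0])
-- and lists with a column shorter than the first (row[i] in the transpose loop).
def Pre_vertical_melting (df_list : List (List String)) : Prop :=
  df_list ≠ [] ∧ ∀ col ∈ df_list, (df_list.headD []).length ≤ col.length
instance (df_list : List (List String)) : Decidable (Pre_vertical_melting df_list) := by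
  unfold Pre_vertical_melting; infer_instance
def pvWitness_vertical_melting : List (List String) :=
  [["a", "(empty_cell)"], ["b", "(empty_cell)"], ["(empty_cell)", "c"]]
def Spec_vertical_melting (df_list : List (List String)) (out : List (List String)) : Prop := out = vertical_melting_alt df_list
instance (df_list : List (List String)) (out : List (List String)) : Decidable (Spec_vertical_melting df_list out) := by unfold Spec_vertical_melting; infer_instance

-- ===== CLAIM (what is proved, stated in full; the proofs are below) =====
def Claim_equal_vertical_melting : Prop := ∀ (df_list : List (List String)), Dom_vertical_melting df_list → Pre_vertical_melting df_list → Spec_vertical_melting df_list (vertical_melting df_list)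

-- ===== LEMMAS AND PROOFS =====

def castL (l : List Nat) : List Int := l.map (fun x => Int.ofNat x)

@[simp] lemma mem_castL {l : List Nat} {z : Int} : z ∈ castL l ↔ ∃ x ∈ l, (x : Int) = z := by
  simp [castL, Int.ofNat_eq_natCast]

lemma castL_append (l1 l2 : List Nat) : castL (l1 ++ l2) = castL l1 ++ castL l2 := by
  simp [castL]

lemma castL_cons (x : Nat) (l : List Nat) : castL (x :: l) = (x : Int) :: castL l := by
  simp [castL, Int.ofNat_eq_natCast]

def schG (Q : Nat → Bool) (stop : Nat) (k : Nat) : List Nat :=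
  if h : k < stop then
    (if Q k then k :: schG Q stop (k + 2) else schG Q stop (k + 1))
  else []
termination_by stop - k

lemma schG_mem {Q : Nat → Bool} {stop : Nat} : ∀ {k x : Nat}, x ∈ schG Q stop k → k ≤ x ∧ x < stop := by
  intro k
  induction hs : stop - k using Nat.strong_induction_on generalizing k with
  | _ s ih =>
    intro x hx
    rw [schG] at hx
    split at hx
    · rename_i h
      split at hx
      · rcases List.mem_cons.1 hx with rfl | hx'
        · omega
        · have := ih (stop - (k+2)) (by omega) rfl hx'; omega
      · have := ih (stop - (k+1)) (by omega) rfl hx; omega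
    · simp at hx

lemma schG_eq_nil {Q : Nat → Bool} {stop k : Nat} (h : stop ≤ k) : schG Q stop k = [] := by
  rw [schG]; simp [Nat.not_lt.2 h]

lemma foldSch (Q : Nat → Bool) (stop : Nat) :
    ∀ (cnt : Nat), ∀ (k : Nat), cnt = stop - k → ∀ (acc : List Int), (∀ z ∈ acc, z ≤ (k : Int) - 2) →
    (List.range' k cnt 1).foldl
      (fun sch j => if Q j = true then (if ((j : Int) - 1) ∈ sch then sch else sch ++ [(j : Int)]) else sch) acc
    = acc ++ castL (schG Q stop k) := by
  intro cnt
  induction cnt using Nat.strong_induction_on with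
  | _ cnt ih =>
    intro k hcnt acc hacc
    match cnt, hcnt with
    | 0, hcnt =>
      rw [schG_eq_nil (by omega)]
      simp [castL]
    | (m+1), hcnt =>
      have hk : k < stop := by omega
      rw [List.range'_succ, List.foldl_cons, schG]
      rw [dif_pos hk]
      by_cases hq : Q k = true
      · rw [if_pos hq]
        have hnm : ((k : Int) - 1) ∉ acc := fun h => by have := hacc _ h; omega
        rw [if_neg hnm, if_pos hq]
        match m with
        | 0 =>
          have : stop = k + 1 := by omega
          rw [schG_eq_nil (by omega)]
          simp [castL, Int.ofNat_eq_natCast]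
        | (m'+1) =>
          rw [List.range'_succ, List.foldl_cons]
          have hstep : (if Q (k+1) = true then (if ((k + 1 : Nat) : Int) - 1 ∈ acc ++ [(k : Int)] then acc ++ [(k : Int)] else (acc ++ [(k : Int)]) ++ [((k+1 : Nat) : Int)]) else acc ++ [(k : Int)]) = acc ++ [(k : Int)] := by
            by_cases h : Q (k+1) = true <;> simp [h]
          rw [hstep]
          rw [ih m' (by omega) (k + 2) (by omega) (acc ++ [(k : Int)])
            (by intro z hz; rcases List.mem_append.1 hz with h | h
                · have := hacc _ h; push_cast; omega
                · simp at h; subst h; push_cast; omega)]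
          simp [castL, Int.ofNat_eq_natCast]
      · rw [if_neg hq, if_neg hq]
        rw [ih m (by omega) (k + 1) (by omega) acc
          (by intro z hz; have := hacc _ hz; push_cast; omega)]

def applyS (l : List Nat) (c : List String) : List String :=
  l.foldl (fun c nn => c.set nn (vmMerge (c.getD nn "") (c.getD (nn + 1) ""))) c

lemma map_getD_range {α} (l : List α) (d : α) :
    (List.range l.length).map (fun j => l.getD j d) = l := by
  apply List.ext_getElem
  · simp
  · intro i h1 h2
    simp [List.getD, List.getElem?_eq_getElem h2]

lemma getD_set_self {α} (l : List α) (i : Nat) (v : α) (d : α) (h : i < l.length) :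
    (l.set i v).getD i d = v := by
  simp [List.getD, h]

lemma getD_set_ne {α} (l : List α) (i j : Nat) (v : α) (d : α) (h : j ≠ i) :
    (l.set i v).getD j d = l.getD j d := by
  simp [List.getD, List.getElem?_set_ne h.symm]

lemma applyS_schG (Q : Nat → Bool) (stop : Nat) :
    ∀ (cnt k : Nat), cnt = stop - k → ∀ (c : List String), stop < c.length →
    applyS (schG Q stop k) c = (List.range c.length).map
      (fun j => if j ∈ schG Q stop k then vmMerge (c.getD j "") (c.getD (j + 1) "") else c.getD j "") := by
  intro cnt
  induction cnt using Nat.strong_induction_on with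
  | _ cnt ih =>
    intro k hcnt c hlen
    by_cases hk : k < stop
    · rw [schG, dif_pos hk]
      by_cases hq : Q k = true
      · rw [if_pos hq]
        have hkc : k < c.length := by omega
        set m := vmMerge (c.getD k "") (c.getD (k + 1) "") with hm
        have : applyS (k :: schG Q stop (k + 2)) c = applyS (schG Q stop (k + 2)) (c.set k m) := rfl
        rw [this, ih (stop - (k + 2)) (by omega) (k + 2) rfl (c.set k m) (by simpa using hlen)]
        apply List.ext_getElem
        · simp
        · intro j h1 h2
          simp only [List.length_set] at *
          simp only [List.getElem_map, List.getElem_range]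
          by_cases hj2 : j ∈ schG Q stop (k + 2)
          · have hjge := (schG_mem hj2).1
            rw [if_pos hj2, if_pos (by simp [hj2])]
            rw [getD_set_ne _ _ _ _ _ (by omega), getD_set_ne _ _ _ _ _ (by omega)]
          · rw [if_neg hj2]
            by_cases hjk : j = k
            · subst hjk
              rw [getD_set_self _ _ _ _ hkc, if_pos (by simp)]
            · rw [getD_set_ne _ _ _ _ _ hjk, if_neg (by simp [hj2, hjk])]
      · rw [if_neg hq]
        exact ih (stop - (k + 1)) (by omega) (k + 1) rfl c hlen
    · rw [schG_eq_nil (by omega)]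
      simpa [applyS] using (map_getD_range c "").symm

lemma enumMapRange {α} (F : Nat → α) : ∀ m : Nat,
    PySem.List.enumerate ((List.range m).map F) 0 = (List.range m).map (fun (j : Nat) => ((j : Int), F j)) := by
  intro m
  induction m with
  | zero => simp [PySem.List.enumerate_nil]
  | succ m ih =>
    rw [List.range_succ, List.map_append, PySem.List.enumerate_append, ih, List.map_append]
    simp [PySem.List.enumerate_cons, PySem.List.enumerate_nil]

lemma foldl_skip_append {α β} (p : α → Prop) [DecidablePred p] (f : α → β) :
    ∀ (l : List α) (acc : List β),
    l.foldl (fun acc x => if p x then acc else acc ++ [f x]) acc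
      = acc ++ (l.filter (fun x => ¬ p x)).map f := by
  intro l
  induction l with
  | nil => simp
  | cons x l ih =>
    intro acc
    by_cases hx : p x <;> simp [hx, ih]

def buildB (Q : Nat → Bool) (n : Nat) (c : List String) (k : Nat) : List String :=
  if h : k < n then
    (if k + 1 < n ∧ Q k = true then
      vmMerge (c.getD k "") (c.getD (k + 1) "") :: buildB Q n c (k + 2)
    else c.getD k "" :: buildB Q n c (k + 1))
  else []
termination_by n - k

lemma buildB_of_schG_nil (Q : Nat → Bool) (n stop : Nat) (hstop : stop + 1 = n)
    (c : List String) (hc : n ≤ c.length) :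
    ∀ (cnt k : Nat), cnt = n - k → schG Q stop k = [] → buildB Q n c k = (c.take n).drop k := by
  intro cnt
  induction cnt using Nat.strong_induction_on with
  | _ cnt ih =>
    intro k hcnt hnil
    conv_lhs => rw [buildB]
    by_cases hk : k < n
    · rw [dif_pos hk]
      have hq : ¬ (k + 1 < n ∧ Q k = true) := by
        rintro ⟨hlt, hqk⟩
        rw [schG, dif_pos (by omega), if_pos hqk] at hnil
        exact List.cons_ne_nil _ _ hnil
      rw [if_neg hq]
      have hnil' : schG Q stop (k + 1) = [] := by
        by_cases hks : k < stop
        · rw [schG, dif_pos hks] at hnil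
          have hqk : Q k ≠ true := by
            intro hqk; rw [if_pos hqk] at hnil; exact List.cons_ne_nil _ _ hnil
          rwa [if_neg hqk] at hnil
        · exact schG_eq_nil (by omega)
      rw [ih (n - (k + 1)) (by omega) (k + 1) rfl hnil']
      rw [List.getD_eq_getElem c "" (show k < c.length by omega)]
      conv_rhs => rw [List.drop_eq_getElem_cons (show k < (c.take n).length by simp; omega)]
      rw [List.getElem_take]
    · rw [dif_neg hk]
      rw [List.drop_of_length_le (by simp; omega)]

lemma AB (Q : Nat → Bool) (n stop : Nat) (hstop : stop + 1 = n) (c : List String) :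
    ∀ (cnt k : Nat), cnt = n - k → ∀ (pre : List Nat) (schT : List Int),
    schT = castL (pre ++ schG Q stop k) →
    (∀ x ∈ pre, x + 2 ≤ k) →
    ((List.range' k cnt 1).filter (fun (j : Nat) => ¬ (((j : Int) - 1) ∈ schT))).map
      (fun (j : Nat) => if (j : Int) ∈ schT then vmMerge (c.getD j "") (c.getD (j + 1) "") else c.getD j "")
    = buildB Q n c k := by
  intro cnt
  induction cnt using Nat.strong_induction_on with
  | _ cnt ih =>
    intro k hcnt pre schT hschT hpre
    match cnt, hcnt with
    | 0, hcnt =>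
      rw [buildB]
      rw [dif_neg (by omega)]
      simp
    | (m+1), hcnt =>
      have hk : k < n := by omega
      have hkm1 : ¬ (((k : Int) - 1) ∈ schT) := by
        intro hmem
        rw [hschT] at hmem
        obtain ⟨x, hx, hxe⟩ := mem_castL.1 hmem
        rcases List.mem_append.1 hx with h | h
        · have := hpre x h; omega
        · have := (schG_mem h).1; omega
      rw [List.range'_succ, List.filter_cons, if_pos (by simpa using hkm1), List.map_cons]
      have hmemk : ((k : Int) ∈ schT) ↔ (k < stop ∧ Q k = true) := by
        rw [hschT]
        constructor
        · intro hmem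
          obtain ⟨x, hx, hxe⟩ := mem_castL.1 hmem
          have hxk : x = k := by omega
          rw [hxk] at hx
          rcases List.mem_append.1 hx with h | h
          · have := hpre k h; omega
          · rw [schG] at h
            split at h
            · rename_i hlt
              split at h
              · exact ⟨hlt, by assumption⟩
              · have := (schG_mem h).1; omega
            · simp at h
        · rintro ⟨hlt, hq⟩
          exact mem_castL.2 ⟨k, List.mem_append.2 (Or.inr (by
            rw [schG, dif_pos hlt, if_pos hq]; exact List.mem_cons_self)), rfl⟩
      conv_rhs => rw [buildB]
      rw [dif_pos hk]
      by_cases hg : k + 1 < n ∧ Q k = true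
      · rw [if_pos hg]
        have hks : k < stop := by omega
        rw [if_pos (hmemk.2 ⟨hks, hg.2⟩)]
        have hschk : schG Q stop k = k :: schG Q stop (k + 2) := by
          rw [schG, dif_pos hks, if_pos hg.2]
        match m with
        | 0 => omega
        | (m'+1) =>
          rw [List.range'_succ, List.filter_cons]
          have : (((k + 1 : Nat) : Int) - 1) ∈ schT := by
            have : ((k : Int)) ∈ schT := hmemk.2 ⟨hks, hg.2⟩
            push_cast
            simpa using this
          rw [if_neg (by simpa using this)]
          rw [ih m' (by omega) (k + 2) (by omega) (pre ++ [k]) schT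
            (by
              rw [hschT, hschk, castL_append, castL_append, castL_cons, castL_append]
              simp [castL, Int.ofNat_eq_natCast])
            (by
              intro x hx
              rcases List.mem_append.1 hx with h | h
              · have := hpre x h; omega
              · simp at h; omega)]
      · rw [if_neg hg]
        have hnk : ¬ ((k : Int) ∈ schT) := by
          rw [hmemk]; rintro ⟨h1, h2⟩; exact hg ⟨by omega, h2⟩
        rw [if_neg hnk]
        have hrepr : schT = castL (pre ++ schG Q stop (k + 1)) := by
          by_cases hks : k < stop
          · have hq : Q k ≠ true := fun hq => hg ⟨by omega, hq⟩
            rw [hschT, schG, dif_pos hks, if_neg hq]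
          · rw [hschT, schG_eq_nil (by omega), schG_eq_nil (by omega)]
        rw [ih m (by omega) (k + 1) (by omega) pre schT hrepr
          (by intro x hx; have := hpre x hx; omega)]

def Qd (df_list : List (List String)) (i : Nat) : Bool :=
  (df_list.drop 2).all (fun col =>
    PySem.Str.isIn "(empty_cell)" (col.getD i "" ++ col.getD (i + 1) ""))

lemma zipWith_zipWith {α β γ δ} (f : α → γ → δ) (g : α → β → γ) :
    ∀ (l : List α) (l' : List β),
    List.zipWith f l (List.zipWith g l l') = List.zipWith (fun a b => f a (g a b)) l l' := by
  intro l
  induction l with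
  | nil => simp
  | cons a l ih => intro l'; cases l' <;> simp [ih]

lemma zipWith_snd {α β} : ∀ (l : List α) (l' : List β), l'.length ≤ l.length →
    List.zipWith (fun _ b => b) l l' = l' := by
  intro l
  induction l with
  | nil => intro l' h; simp at h ⊢; omega
  | cons a l ih =>
    intro l' h
    cases l' with
    | nil => simp
    | cons b l' => simp at h ⊢; exact ih l' (by omega)

lemma vmLoop_eq (df : List (List String)) (n : Nat) :
    ∀ (cnt k : Nat), cnt = n - k → ∀ (ncs : List (List String)), ncs.length = df.length →
    vmLoop df n k ncs = List.zipWith (fun col nc => nc ++ buildB (Qd df) n col k) df ncs := by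
  intro cnt
  induction cnt using Nat.strong_induction_on with
  | _ cnt ih =>
    intro k hcnt ncs hlen
    conv_lhs => rw [vmLoop]
    by_cases hk : k < n
    · rw [if_pos hk]
      by_cases hg : k + 1 < n ∧ ((df.drop 2).all (fun col =>
          PySem.Str.isIn "(empty_cell)" (col.getD k "" ++ col.getD (k + 1) ""))) = true
      · rw [if_pos hg]
        rw [ih (n - (k + 2)) (by omega) (k + 2) rfl _ (by simp [hlen])]
        rw [zipWith_zipWith]
        congr 1
        funext col nc
        have hb : buildB (Qd df) n col k
            = vmMerge (col.getD k "") (col.getD (k + 1) "") :: buildB (Qd df) n col (k + 2) := by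
          conv_lhs => rw [buildB]
          rw [dif_pos hk, if_pos (by exact ⟨hg.1, hg.2⟩)]
        rw [hb]
        simp
      · rw [if_neg hg]
        rw [ih (n - (k + 1)) (by omega) (k + 1) rfl _ (by simp [hlen])]
        rw [zipWith_zipWith]
        congr 1
        funext col nc
        have hb : buildB (Qd df) n col k = col.getD k "" :: buildB (Qd df) n col (k + 1) := by
          conv_lhs => rw [buildB]
          rw [dif_pos hk, if_neg (by exact hg)]
        rw [hb]
        simp
    · rw [if_neg hk]
      have hb : ∀ col : List String, buildB (Qd df) n col k = [] := by
        intro col; rw [buildB]; rw [dif_neg hk]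
      simp only [hb, List.append_nil]
      exact (zipWith_snd df ncs (by omega)).symm

lemma foldl_map_swap (f : Int → List String → List String) :
    ∀ (l : List Int) (df : List (List String)),
    l.foldl (fun dfl nn => dfl.map (f nn)) df = df.map (fun c => l.foldl (fun c nn => f nn c) c) := by
  intro l
  induction l with
  | nil => simp
  | cons x l ih =>
    intro df
    simp only [List.foldl_cons, ih, List.map_map]
    rfl

lemma drop_range' (s m t : Nat) : (List.range' s m 1).drop t = List.range' (s + t) (m - t) 1 := by
  apply List.ext_getElem
  · simp
  · intro i h1 h2
    simp only [List.getElem_drop, List.getElem_range', one_mul]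
    omega

lemma drop_eq_map_range' {α} (l : List α) (d : α) (s : Nat) :
    l.drop s = (List.range' s (l.length - s) 1).map (fun m => l.getD m d) := by
  apply List.ext_getElem
  · simp
  · intro i h1 h2
    simp only [List.getElem_drop, List.getElem_map, List.getElem_range', one_mul]
    rw [List.getD_eq_getElem l d (by simp at h1; omega)]



lemma schG_congr {stop : Nat} (Q1 Q2 : Nat → Bool) (h : ∀ j, j < stop → Q1 j = Q2 j) :
    ∀ (cnt k : Nat), cnt = stop - k → schG Q1 stop k = schG Q2 stop k := by
  intro cnt
  induction cnt using Nat.strong_induction_on with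
  | _ cnt ih =>
    intro k hcnt
    conv_lhs => rw [schG]
    conv_rhs => rw [schG]
    by_cases hk : k < stop
    · rw [dif_pos hk, dif_pos hk, h k hk]
      by_cases hq : Q2 k = true
      · rw [if_pos hq, if_pos hq, ih (stop - (k + 2)) (by omega) (k + 2) rfl]
      · rw [if_neg hq, if_neg hq, ih (stop - (k + 1)) (by omega) (k + 1) rfl]
    · rw [dif_neg hk, dif_neg hk]

@[simp] lemma natCast_mem_castL {j : Nat} {l : List Nat} : ((j : Nat) : Int) ∈ castL l ↔ j ∈ l := by
  simp [castL, Int.ofNat_eq_natCast]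

lemma all_congr_mem {α} (l : List α) (f g : α → Bool) (h : ∀ x ∈ l, f x = g x) :
    l.all f = l.all g := by
  induction l with
  | nil => rfl
  | cons x l ih =>
    simp only [List.all_cons, h x (List.mem_cons_self), ih (fun y hy => h y (List.mem_cons_of_mem x hy))]

lemma map_range_getD_comp {α β} (l : List α) (d : α) (G : α → β) :
    (List.range l.length).map (fun i => G (l.getD i d)) = l.map G := by
  conv_rhs => rw [← map_getD_range l d, List.map_map]
  rfl

lemma vmMerge_def (s t : String) :
    PySem.Str.replace (PySem.Str.replace (PySem.Str.replace (s ++ "_" ++ t)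
      "_(empty_cell)" "") "(empty_cell)_" "") "-_" "-" = vmMerge s t := rfl

lemma foldl_castL {β : Type} (f : β → Int → β) (l : List Nat) (init : β) :
    (castL l).foldl f init = l.foldl (fun acc x => f acc ((x : Nat) : Int)) init := by
  simp [castL, List.foldl_map, Int.ofNat_eq_natCast]

lemma castSucc_eq (m : Nat) : ((m : Int) + 1) = ((m + 1 : Nat) : Int) := by push_cast; ring

lemma applyS_schG' (Q : Nat → Bool) (stop : Nat) (cnt k : Nat) (hcnt : cnt = stop - k)
    (c : List String) (hlen : stop < c.length) :
    (schG Q stop k).foldl (fun c nn => c.set nn (vmMerge (c.getD nn "") (c.getD (nn + 1) ""))) c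
      = (List.range c.length).map
        (fun j => if j ∈ schG Q stop k then vmMerge (c.getD j "") (c.getD (j + 1) "") else c.getD j "") :=
  applyS_schG Q stop cnt k hcnt c hlen

lemma colA_eq (Q : Nat → Bool) (n stop : Nat) (hstop : stop + 1 = n) (c : List String)
    (hn : n ≤ c.length) :
    List.foldl
      (fun x (y : Nat) =>
        if ((y : Int)) - 1 ∈ castL (schG Q stop 0) then x
        else
          x ++
            [if y ∈ schG Q stop 0 then vmMerge (c.getD y "") (c.getD (y + 1) "") else c.getD y ""])
      [] (List.range c.length) = buildB Q n c 0 ++ c.drop n := by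
  rw [foldl_skip_append (fun (j : Nat) => ((j : Int) - 1) ∈ castL (schG Q stop 0))
    (fun (j : Nat) => if j ∈ schG Q stop 0 then
      vmMerge (c.getD j "") (c.getD (j + 1) "") else c.getD j "")]
  simp only [List.nil_append]
  simp only [← natCast_mem_castL]
  rw [List.range_eq_range']
  have hsplit : List.range' 0 c.length 1 = List.range' 0 n 1 ++ List.range' n (c.length - n) 1 := by
    conv_lhs => rw [show c.length = n + (c.length - n) from by omega]
    rw [← List.range'_append]
    norm_num
  rw [hsplit, List.filter_append, List.map_append]
  rw [AB Q n stop hstop c n 0 (by omega) [] (castL (schG Q stop 0))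
    (by rw [List.nil_append]) (by simp)]
  congr 1
  rw [List.filter_eq_self.2 (fun j hj => by
    rw [List.mem_range'_1] at hj
    simp only [decide_eq_true_eq]
    intro hmem
    obtain ⟨x, hx, hxe⟩ := mem_castL.1 hmem
    have := (schG_mem hx).2
    omega)]
  have hmap : ∀ j ∈ List.range' n (c.length - n) 1,
      (if ((j : Nat) : Int) ∈ castL (schG Q stop 0) then
        vmMerge (c.getD j "") (c.getD (j + 1) "") else c.getD j "") = c.getD j "" := by
    intro j hj
    rw [List.mem_range'_1] at hj
    rw [if_neg (by
      intro hmem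
      obtain ⟨x, hx, hxe⟩ := mem_castL.1 hmem
      have := (schG_mem hx).2
      omega)]
  rw [List.map_congr_left hmap]
  exact (drop_eq_map_range' c "" n).symm

lemma alt_eq_map_buildB (df : List (List String)) :
    vertical_melting_alt df = df.map
      (fun c => buildB (Qd df) (df.headD []).length c 0 ++ c.drop (df.headD []).length) := by
  unfold vertical_melting_alt
  rw [vmLoop_eq df (df.headD []).length ((df.headD []).length - 0) 0 rfl _ (by simp)]
  rw [List.zipWith_map_right, zipWith_zipWith, List.zipWith_self]
  apply List.map_congr_left
  intro c _
  rw [PySem.List.slice_from _ (by positivity)]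
  simp

-- ===== VERDICT (by name: the statement is the Claim_ definition above) =====
theorem vertical_melting_spec : Claim_equal_vertical_melting := by
  intro df _ hpre
  obtain ⟨hne, hlen⟩ := hpre
  unfold Spec_vertical_melting
  rw [alt_eq_map_buildB]
  unfold vertical_melting
  have h0 : PySem.List.pyGetD df 0 [] = df.headD [] := by
    cases df with
    | nil => exact absurd rfl hne
    | cons a l => simp [PySem.List.pyGetD_zero_cons]
  rw [h0]
  set n := (df.headD []).length with hn
  simp only [PySem.List.foldl_append_singleton_eq_map, List.nil_append]
  have hlen_rl : (List.map (fun x => List.map (fun x_1 => PySem.List.pyGetD x_1 x "") df)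
      (PySem.List.pyRange 0 (n : Int) 1)).length = n := by
    simp [PySem.List.length_pyRange_one]
  rw [hlen_rl]
  by_cases hn0 : n = 0
  · -- no rows: sch loop range is empty, A returns df unchanged; each column is []
    rw [hn0]
    rw [show PySem.List.pyRange 0 (((0 : Nat) : Int) - 1) 1 = [] from
          PySem.List.pyRange_one_eq_nil (by norm_num),
        show PySem.List.pyRange 0 ((0 : Nat) : Int) 1 = [] from
          PySem.List.pyRange_one_eq_nil (by norm_num)]
    simp only [List.map_nil, List.foldl_nil]
    rw [if_neg (by simp)]
    have hb : ∀ c ∈ df, buildB (Qd df) 0 c 0 ++ c.drop 0 = id c := by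
      intro c hc
      rw [buildB, dif_neg (by omega), List.drop_zero]
      rfl
    rw [List.map_congr_left hb, List.map_id]
  · have hn1 : 1 ≤ n := by omega
    have hc1 : ((n : Nat) : Int) - 1 = (((n - 1 : Nat)) : Int) := by omega
    rw [hc1, PySem.List.pyRange_one 0 (((n - 1 : Nat)) : Int)]
    simp only [Int.sub_zero, Int.toNat_natCast, zero_add]
    rw [List.range_eq_range', List.foldl_map]
    rw [foldSch _ (n - 1) (n - 1) 0 (by omega) [] (by intro z hz; simp at hz)]
    simp only [List.nil_append]
    rw [schG_congr _ (Qd df) ?hQ ((n - 1) - 0) 0 rfl]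
    case hQ =>
      intro j hj
      have hj1 : j < n := by omega
      have hj2 : j + 1 < n := by omega
      have hcast : ((j : Int) + 1) = ((j + 1 : Nat) : Int) := castSucc_eq j
      rw [hcast,
        PySem.List.pyGetD_map_pyRange _ n j _ hj1,
        PySem.List.pyGetD_map_pyRange _ n (j + 1) _ hj2]
      simp only [List.length_map]
      rw [PySem.List.slice_from _ (show (0:Int) ≤ 2 by norm_num)]
      simp only [show ((2 : Int)).toNat = 2 from rfl]
      rw [PySem.List.pyRange_one 0 ((df.length : Nat) : Int)]
      simp only [Int.sub_zero, Int.toNat_natCast, zero_add]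
      rw [List.range_eq_range', List.map_map, ← List.map_drop, drop_range']
      rw [List.all_map]
      simp only [Qd]
      rw [drop_eq_map_range' df [] 2, List.all_map]
      apply all_congr_mem
      intro m hm
      rw [List.mem_range'_1] at hm
      have hmL : m < df.length := by omega
      simp only [Function.comp_apply, PySem.List.pyGetD_natCast, List.getD, List.getElem?_map,
        List.getElem?_eq_getElem hmL, Option.map_some, Option.getD_some]
    by_cases hSe : schG (Qd df) (n - 1) 0 = []
    · rw [hSe]
      rw [if_neg (by simp [castL])]
      have hb : ∀ c ∈ df, buildB (Qd df) n c 0 ++ c.drop n = id c := by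
        intro c hc
        rw [buildB_of_schG_nil (Qd df) n (n - 1) (by omega) c (hlen c hc) (n - 0) 0 rfl hSe]
        rw [List.drop_zero, List.take_append_drop]
        rfl
      rw [List.map_congr_left hb, List.map_id]
    · rw [if_pos (by simp [castL, hSe])]
      simp only [vmMerge_def]
      rw [foldl_map_swap]
      simp only [List.length_map]
      simp only [foldl_castL]
      simp only [castSucc_eq, PySem.List.pySetD_natCast, PySem.List.pyGetD_natCast]
      rw [PySem.List.pyRange_one 0 ((df.length : Nat) : Int)]
      simp only [Int.sub_zero, Int.toNat_natCast, zero_add]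
      rw [List.map_map]
      rw [← map_range_getD_comp df [] (fun c => buildB (Qd df) n c 0 ++ c.drop n)]
      apply List.map_congr_left
      intro i hi
      have hi' : i < df.length := List.mem_range.1 hi
      simp only [Function.comp_apply, PySem.List.pyGetD_natCast]
      rw [List.getD_eq_getElem _ _ (by simpa using hi'), List.getElem_map,
          List.getD_eq_getElem df [] hi']
      have hcl : n ≤ (df[i]).length := hlen _ (List.getElem_mem hi')
      rw [applyS_schG' (Qd df) (n - 1) (n - 1) 0 (by omega) df[i] (by omega)]
      rw [enumMapRange, List.foldl_map]
      dsimp only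
      exact colA_eq (Qd df) n (n - 1) (by omega) df[i] hcl
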